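-- pv_equiv track=rewrite | github.com/clemkoa/hashcode-2019 | main.py | construct_results
-- ===== SOURCE A (Python) =====
-- import copy
--
-- def get_keywords(photo, lines):
--     if len(photo) == 2:
--         return lines[photo[0]][1].union(lines[photo[1]][1])
--     return lines[photo[0]][1]
--
-- def pair_score(photo1, photo2, lines):
--     keywords1 = get_keywords(photo1, lines)
--     keywords2 = get_keywords(photo2, lines)
--     num_inter = len(keywords1.intersection(keywords2))
--     num_1_minus_2 = len(keywords1.difference(keywords2))
--     num_2_minus_1 = len(keywords2.difference(keywords1))
--     return min(num_inter, num_1_minus_2, num_2_minus_1)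
--
-- def construct_results(photos, lines):
--     element = photos.pop()
--     results = [element]
--     while len(photos) > 0:
--         index = find_index_best_pair(element, photos, lines)
--         results.append(photos[index])
--         element = copy.copy(photos[index])
--         del photos[index]
--     return results
--
-- def find_index_best_pair(photo, photos, lines):
--     lim = 100
--     if len(photos) < lim:
--         return 0
--     for i in range(lim):
--         if pair_score(photo, photos[i], lines) > 2:
--             return i
--     for i in range(lim):
--         if pair_score(photo, photos[i], lines) > 0:
--             return i
--     return 0
-- ===== SOURCE B (Python) =====
-- def _key(p, lines):
--     k = lines[p[0]][1]
--     if len(p) == 2: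
--         k = k | lines[p[1]][1]
--     return k
--
-- def _score(ek, k):
--     inter = len(ek & k)
--     return min(inter, len(ek) - inter, len(k) - inter)
--
-- def construct_results(photos, lines):
--     # Return-value equivalent to A; does not mutate `photos` (A empties it in place).
--     n = len(photos)
--     if n <= 100:
--         # below the limit every greedy pick is index 0: last photo, then the rest in order
--         return [photos[-1]] + photos[:-1]
--     # sliding window of the first 100 remaining photos (keys computed once on entry),
--     # fed from the untouched tail of the original list: removal is O(100), not O(n)
--     window = [(p, _key(p, lines)) for p in photos[:100]]
--     t, last = 100, n - 1          # tail cursor; photos[last] is the start element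
--     elem = photos[last]
--     ek = _key(elem, lines)
--     results = [elem]
--     while len(window) == 100:
--         scores = [_score(ek, k) for _, k in window]
--         pick = next((i for i, s in enumerate(scores) if s > 2),
--                     next((i for i, s in enumerate(scores) if s > 0), 0))
--         elem, ek = window.pop(pick)
--         results.append(elem)
--         if t < last:
--             p = photos[t]
--             window.append((p, _key(p, lines)))
--             t += 1
--     return results + [p for p, _ in window]
-- ===== Notes on version B (the rewrite author's own statement) =====
-- stated objective: faster
-- what changed: B replaces A's greedy loop over the whole mutable list (del photos[index] shifts up to n elements per step, and every pair_score call rebuilds both keyword sets) by a 100-slot sliding window fed from the untouched tail of the input: removal pops from the 100-item window and refills from the tail cursor (O(100) per step instead of O(n)), keyword sets are built once per photo on window entry, per-step scores are staged into one list, and the sub-101-photo case is returned in closed form. Pre_ excludes inputs where A raises (empty photos; …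
-- outside the precondition, e.g. on construct_results([], [(0, {'a'})]): A raises IndexError, B raises IndexError
import Mathlib
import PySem

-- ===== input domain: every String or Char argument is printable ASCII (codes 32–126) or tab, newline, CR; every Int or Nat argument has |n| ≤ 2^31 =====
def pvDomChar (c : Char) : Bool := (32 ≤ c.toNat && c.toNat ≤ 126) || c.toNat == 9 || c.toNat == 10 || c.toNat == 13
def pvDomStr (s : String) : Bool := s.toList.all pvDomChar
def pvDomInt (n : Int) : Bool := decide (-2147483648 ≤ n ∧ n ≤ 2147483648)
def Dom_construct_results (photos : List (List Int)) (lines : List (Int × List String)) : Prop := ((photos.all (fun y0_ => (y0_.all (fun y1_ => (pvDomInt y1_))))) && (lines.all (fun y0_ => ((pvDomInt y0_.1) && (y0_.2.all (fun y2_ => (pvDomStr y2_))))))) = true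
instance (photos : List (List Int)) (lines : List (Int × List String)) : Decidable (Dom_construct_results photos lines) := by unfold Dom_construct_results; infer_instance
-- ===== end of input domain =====

-- B replaces A's delete-from-the-whole-list greedy loop by a 100-slot sliding window fed
-- from the untouched tail (removal touches 100 items, not n), with keyword sets built once
-- on window entry and per-step scores staged into a list.
-- Equivalence is about the RETURN value only: Python A empties `photos` in place, B does not mutate it.

-- ===== PORT A =====
-- keyword set of the line with index i (Python: lines[i][1]); the default is only reached outside Pre_
def lineKw (lines : List (Int × List String)) (i : Int) : PySem.Set String :=
  PySem.Set.ofList (PySem.List.pyGetD lines i ((0 : Int), ([] : List String))).2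

def get_keywords (photo : List Int) (lines : List (Int × List String)) : PySem.Set String :=
  if photo.length = 2 then
    PySem.Set.union (lineKw lines (PySem.List.pyGetD photo 0 0)) (lineKw lines (PySem.List.pyGetD photo 1 0))
  else lineKw lines (PySem.List.pyGetD photo 0 0)

def pair_score (photo1 photo2 : List Int) (lines : List (Int × List String)) : Int :=
  let k1 := get_keywords photo1 lines
  let k2 := get_keywords photo2 lines
  min (PySem.Set.len (PySem.Set.inter k1 k2))
    (min (PySem.Set.len (PySem.Set.diff k1 k2)) (PySem.Set.len (PySem.Set.diff k2 k1)))

def find_index_best_pair (photo : List Int) (photos : List (List Int)) (lines : List (Int × List String)) : Nat :=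
  if photos.length < 100 then 0
  else
    match (List.range 100).find? (fun (i : Nat) => 2 < pair_score photo (PySem.List.pyGetD photos (i : Int) []) lines) with
    | some i => i
    | none =>
      match (List.range 100).find? (fun (i : Nat) => 0 < pair_score photo (PySem.List.pyGetD photos (i : Int) []) lines) with
      | some i => i
      | none => 0

-- the while-loop of A; fuel = photos.length at the call site
def loopA (lines : List (Int × List String)) : Nat → List Int → List (List Int) → List (List Int) → List (List Int)
  | 0, _, _, results => results
  | fuel + 1, element, photos, results =>
    if 0 < photos.length then
      let index := find_index_best_pair element photos lines
      let e := PySem.List.pyGetD photos (index : Int) []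
      loopA lines fuel e (photos.eraseIdx index) (results ++ [e])
    else results

def construct_results (photos : List (List Int)) (lines : List (Int × List String)) : List (List Int) :=
  match PySem.List.pop? photos (-1) with
  | none => []  -- Python raises IndexError on empty photos; excluded by Pre_
  | some (element, rest) => loopA lines rest.length element rest [element]

-- ===== PORT B =====
-- B's _key helper (keyword set of one photo, computed once when it enters the window)
def bKey (lines : List (Int × List String)) (p : List Int) : PySem.Set String :=
  let k := PySem.Set.ofList (PySem.List.pyGetD lines (PySem.List.pyGetD p 0 0) ((0 : Int), ([] : List String))).2
  if p.length = 2 then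
    PySem.Set.union k (PySem.Set.ofList (PySem.List.pyGetD lines (PySem.List.pyGetD p 1 0) ((0 : Int), ([] : List String))).2)
  else k

-- B's _score helper
def scoreB (ek k : PySem.Set String) : Int :=
  let inter := PySem.Set.len (PySem.Set.inter ek k)
  min inter (min (PySem.Set.len ek - inter) (PySem.Set.len k - inter))

-- B's pick: first index with score > 2, else first with score > 0, else 0 (the two next(...) calls)
def pickIdx (scores : List Int) : Nat :=
  match scores.findIdx? (fun s => decide (2 < s)) with
  | some i => i
  | none => (scores.findIdx? (fun s => decide (0 < s))).getD 0

-- B's while-loop over (window, tail); fuel = window.length + tail.length at the call site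
def loopB (lines : List (Int × List String)) :
    Nat → PySem.Set String → List (List Int × PySem.Set String) → List (List Int) → List (List Int) → List (List Int)
  | 0, _, window, _, results => results ++ window.map Prod.fst
  | fuel + 1, ek, window, tail, results =>
    if window.length = 100 then
      let scores := window.map (fun pk => scoreB ek pk.2)
      let pick := pickIdx scores
      match PySem.List.pop? window (pick : Int) with
      | none => results  -- unreachable: pick < 100 = window.length
      | some ((p, k), rest) =>
        match tail with
        | [] => loopB lines fuel k rest [] (results ++ [p])
        | t :: ts => loopB lines fuel k (rest ++ [(t, bKey lines t)]) ts (results ++ [p])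
    else results ++ window.map Prod.fst

def construct_results_alt (photos : List (List Int)) (lines : List (Int × List String)) : List (List Int) :=
  if photos.length ≤ 100 then
    [(PySem.List.pyGet? photos (-1)).getD []] ++ PySem.List.slice photos none (some (-1))
  else
    -- photos[:100] = take 100 and photos[100:n-1] = (dropLast).drop 100 (exact: nonnegative slices, n ≥ 101)
    let window := (photos.take 100).map (fun p => (p, bKey lines p))
    let tail := photos.dropLast.drop 100
    let elem := (PySem.List.pyGet? photos (-1)).getD []
    loopB lines (window.length + tail.length) (bKey lines elem) window tail [elem]

-- ===== PRECONDITION & SPEC =====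
-- A's requirement on one photo once its keyword set is computed: nonempty, line indices in range (Python wraparound allowed)
def okPhoto (linesLen : Nat) (p : List Int) : Prop :=
  p ≠ [] ∧ PySem.Raise.InRange linesLen p.headI ∧ (p.length = 2 → PySem.Raise.InRange linesLen (p.getD 1 0))

-- Pre_ excludes the inputs on which A raises (empty photos: pop() raises IndexError; and with ≥ 101 photos an
-- empty photo or an out-of-range line index raises IndexError in get_keywords when that photo gets scored) plus,
-- conservatively, inputs with ≥ 101 photos where an invalid photo happens never to be scored because the greedy
-- run removes its neighbours first — whether A raises there depends on the whole run, which a closed-form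
-- precondition cannot express, and B (which computes the keyword set of every photo entering the window) raises
-- on all of them.
def Pre_construct_results (photos : List (List Int)) (lines : List (Int × List String)) : Prop :=
  photos ≠ [] ∧ (101 ≤ photos.length → ∀ p ∈ photos, okPhoto lines.length p)

instance (photos : List (List Int)) (lines : List (Int × List String)) : Decidable (Pre_construct_results photos lines) := by
  unfold Pre_construct_results okPhoto; infer_instance

def pvWitness_construct_results : List (List Int) × (List (Int × List String)) :=
  ([[0], [0, 1], [1]], [((0 : Int), ["cat", "sun"]), ((1 : Int), ["sun", "sea"])])

def Spec_construct_results (photos : List (List Int)) (lines : List (Int × List String)) (out : List (List Int)) : Prop := out = construct_results_alt photos lines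
instance (photos : List (List Int)) (lines : List (Int × List String)) (out : List (List Int)) : Decidable (Spec_construct_results photos lines out) := by unfold Spec_construct_results; infer_instance

-- ===== CLAIM (what is proved, stated in full; the proofs are below) =====
def Claim_equal_construct_results : Prop := ∀ (photos : List (List Int)) (lines : List (Int × List String)), Dom_construct_results photos lines → Pre_construct_results photos lines → Spec_construct_results photos lines (construct_results photos lines)

-- ===== LEMMAS AND PROOFS =====

-- B's per-photo key agrees with A's get_keywords (both go through the same pyGetD defaults)
theorem bKey_eq (lines : List (Int × List String)) (p : List Int) :
    bKey lines p = get_keywords p lines := by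
  unfold bKey get_keywords lineKw
  split <;> rfl

-- find? only depends on the predicate's values on the list
theorem find?_congr_mem {A : Type} (l : List A) (p q : A → Bool)
    (h : ∀ x ∈ l, p x = q x) : l.find? p = l.find? q := by
  induction l with
  | nil => rfl
  | cons a l ih =>
    simp only [List.find?]
    rw [h a (by simp)]
    cases q a
    · exact ih (fun x hx => h x (by simp [hx]))
    · rfl

theorem kw_nodup (p : List Int) (lines : List (Int × List String)) :
    (get_keywords p lines).Nodup := by
  unfold get_keywords
  split
  · exact PySem.Set.nodup_union _ _ (PySem.Set.nodup_ofList _)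
  · exact PySem.Set.nodup_ofList _

-- |s ∩ t| = |t ∩ s| for Nodup lists viewed as sets
theorem inter_len_comm (s t : PySem.Set String) (hs : s.Nodup) (ht : t.Nodup) :
    (PySem.Set.inter s t).length = (PySem.Set.inter t s).length := by
  have h1 : (PySem.Set.inter s t).Nodup := PySem.Set.nodup_inter s t hs
  have h2 : (PySem.Set.inter t s).Nodup := PySem.Set.nodup_inter t s ht
  refine List.Perm.length_eq ((List.perm_ext_iff_of_nodup h1 h2).2 ?_)
  intro x
  rw [PySem.Set.mem_inter, PySem.Set.mem_inter]
  tauto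

-- |s \ t| + |s ∩ t| = |s| (a filter partition of s)
theorem diff_inter_len (s t : PySem.Set String) :
    (PySem.Set.diff s t).length + (PySem.Set.inter s t).length = s.length := by
  unfold PySem.Set.diff PySem.Set.inter
  have h := List.length_eq_length_filter_add (l := s) (fun x => PySem.Set.contains t x)
  omega

-- B's score formula agrees with A's pair_score
theorem score_eq (p q : List Int) (lines : List (Int × List String)) :
    pair_score p q lines = scoreB (get_keywords p lines) (get_keywords q lines) := by
  have hd1 := diff_inter_len (get_keywords p lines) (get_keywords q lines)
  have hd2 := diff_inter_len (get_keywords q lines) (get_keywords p lines)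
  have hc := inter_len_comm (get_keywords p lines) (get_keywords q lines)
    (kw_nodup p lines) (kw_nodup q lines)
  simp only [pair_score, scoreB, PySem.Set.len]
  have hb : ((PySem.Set.diff (get_keywords p lines) (get_keywords q lines)).length : Int) =
      ((get_keywords p lines).length : Int) -
        ((PySem.Set.inter (get_keywords p lines) (get_keywords q lines)).length : Int) := by omega
  have hcz : ((PySem.Set.diff (get_keywords q lines) (get_keywords p lines)).length : Int) =
      ((get_keywords q lines).length : Int) -
        ((PySem.Set.inter (get_keywords p lines) (get_keywords q lines)).length : Int) := by omega
  rw [hb, hcz]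

-- a find? over the indices of l is a findIdx? over l
theorem range_find?_eq_findIdx? {A : Type} (d : A) :
    ∀ (l : List A) (q : A → Bool),
      (List.range l.length).find? (fun i => q (l.getD i d)) = l.findIdx? q := by
  intro l
  induction l with
  | nil => intro q; rfl
  | cons a l ih =>
    intro q
    rw [List.length_cons, List.range_succ_eq_map, List.find?]
    simp only [List.getD_cons_zero]
    cases hqa : q a
    · rw [List.find?_map]
      simp only [List.findIdx?_cons, hqa]
      rw [show ((fun i => q ((a :: l).getD i d)) ∘ Nat.succ) = (fun i => q (l.getD i d)) from rfl, ih]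
      cases l.findIdx? q <;> rfl
    · simp [List.findIdx?_cons, hqa]

-- A's pick index is B's pickIdx on the precomputed score list, when ≥ 100 photos remain
theorem pick_eq (element : List Int) (photos : List (List Int)) (lines : List (Int × List String))
    (h100 : 100 ≤ photos.length) :
    find_index_best_pair element photos lines =
      pickIdx (((photos.take 100).map (fun p => (p, bKey lines p))).map (fun pk => scoreB (bKey lines element) pk.2)) := by
  have hw : ((photos.take 100).map (fun p => (p, bKey lines p))).map (fun pk => scoreB (bKey lines element) pk.2)
      = (photos.take 100).map (fun p => scoreB (bKey lines element) (bKey lines p)) := by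
    rw [List.map_map]; rfl
  have hlen : (photos.take 100).length = 100 := by
    rw [List.length_take]; omega
  have key : ∀ (c : Int), (List.range 100).find? (fun (i : Nat) =>
      decide (c < pair_score element (PySem.List.pyGetD photos (i : Int) []) lines)) =
      ((photos.take 100).map (fun p => scoreB (bKey lines element) (bKey lines p))).findIdx?
        (fun s => decide (c < s)) := by
    intro c
    have h1 : (List.range 100).find? (fun (i : Nat) =>
        decide (c < pair_score element (PySem.List.pyGetD photos (i : Int) []) lines)) =
        (List.range ((photos.take 100).map (fun p => scoreB (bKey lines element) (bKey lines p))).length).find?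
          (fun (i : Nat) => decide (c < ((photos.take 100).map (fun p => scoreB (bKey lines element) (bKey lines p))).getD i 0)) := by
      rw [List.length_map, hlen]
      refine find?_congr_mem _ _ _ ?_
      intro i hi
      have hi100 : i < 100 := List.mem_range.1 hi
      have hiphotos : i < photos.length := by omega
      have hitake : i < (photos.take 100).length := by omega
      have himap : i < ((photos.take 100).map (fun p => scoreB (bKey lines element) (bKey lines p))).length := by
        rw [List.length_map]; omega
      simp only [PySem.List.pyGetD_natCast, List.getD_eq_getElem _ _ hiphotos,
        List.getD_eq_getElem _ _ himap, List.getElem_map, List.getElem_take]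
      rw [score_eq]
      simp only [bKey_eq]
    exact h1.trans (range_find?_eq_findIdx? 0 _ (fun s => decide (c < s)))
  unfold find_index_best_pair pickIdx
  rw [if_neg (by omega), hw, ← key 2, ← key 0]
  cases (List.range 100).find? (fun (i : Nat) =>
      decide (2 < pair_score element (PySem.List.pyGetD photos (i : Int) []) lines)) with
  | some i => rfl
  | none =>
    cases (List.range 100).find? (fun (i : Nat) =>
        decide (0 < pair_score element (PySem.List.pyGetD photos (i : Int) []) lines)) <;> rfl

-- B's pick is always below the window length (here 100)
theorem pickIdx_lt (scores : List Int) (h : scores.length = 100) : pickIdx scores < 100 := by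
  unfold pickIdx
  cases h2 : scores.findIdx? (fun s => decide (2 < s)) with
  | some i =>
    have := List.findIdx?_eq_some_iff_findIdx_eq.mp h2
    show i < 100
    omega
  | none =>
    cases h0 : scores.findIdx? (fun s => decide (0 < s)) with
    | some i =>
      have := List.findIdx?_eq_some_iff_findIdx_eq.mp h0
      show i < 100
      omega
    | none =>
      show (0 : Nat) < 100
      omega
-- A's loop once fewer than 100 photos remain: it appends them in order
theorem loopA_small (lines : List (Int × List String)) :
    ∀ (photos : List (List Int)) (element : List Int) (results : List (List Int)),
      photos.length < 100 →
      loopA lines photos.length element photos results = results ++ photos := by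
  intro photos
  induction photos with
  | nil => intro element results _; simp [loopA]
  | cons p ps ih =>
    intro element results h
    have hidx : find_index_best_pair element (p :: ps) lines = 0 := by
      unfold find_index_best_pair
      rw [if_pos h]
    show loopA lines (ps.length + 1) element (p :: ps) results = results ++ (p :: ps)
    simp only [loopA, List.length_cons, Nat.zero_lt_succ, if_pos, hidx,
      PySem.List.pyGetD_natCast, List.getD_cons_zero, List.eraseIdx_cons_zero]
    simp only [List.length_cons] at h
    rw [ih p (results ++ [p]) (by omega)]
    simp

-- taking / dropping one past a left part of an append
theorem take_append_cons {A : Type} (l : List A) (t : A) (ts : List A) :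
    (l ++ t :: ts).take (l.length + 1) = l ++ [t] := by
  rw [List.take_append, List.take_of_length_le (Nat.le_add_right _ 1), Nat.add_sub_cancel_left]
  rfl

theorem drop_append_cons {A : Type} (l : List A) (t : A) (ts : List A) :
    (l ++ t :: ts).drop (l.length + 1) = ts := by
  rw [List.drop_append, List.drop_eq_nil_of_le (Nat.le_add_right _ 1), Nat.add_sub_cancel_left]
  rfl

-- the main simulation: A's loop over the whole remaining list = B's loop over (window, tail)
theorem loop_sim (lines : List (Int × List String)) :
    ∀ (fuel : Nat) (element : List Int) (photos : List (List Int)) (results : List (List Int)),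
      photos.length = fuel →
      loopA lines fuel element photos results =
        loopB lines fuel (bKey lines element)
          ((photos.take 100).map (fun p => (p, bKey lines p))) (photos.drop 100) results := by
  intro fuel
  induction fuel with
  | zero =>
    intro element photos results h
    rw [List.eq_nil_of_length_eq_zero h]
    simp [loopA, loopB]
  | succ fuel ih =>
    intro element photos results h
    set wmap := fun p => (p, bKey lines p) with hwmap
    by_cases h100 : 100 ≤ photos.length
    · have hlen : ((photos.take 100).map wmap).length = 100 := by
        rw [List.length_map, List.length_take]; omega
      set scores := ((photos.take 100).map wmap).map (fun pk => scoreB (bKey lines element) pk.2) with hscores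
      set pick := pickIdx scores with hpickdef
      have hpick100 : pick < 100 := pickIdx_lt scores (by rw [hscores, List.length_map, hlen])
      have hpickphotos : pick < photos.length := by omega
      have hpicktake : pick < (photos.take 100).length := by rw [List.length_take]; omega
      have hpickwin : pick < ((photos.take 100).map wmap).length := by omega
      have hpickeq : find_index_best_pair element photos lines = pick := by
        rw [pick_eq element photos lines h100, hpickdef, hscores, hwmap]
      have hA : loopA lines (fuel + 1) element photos results =
          loopA lines fuel photos[pick] (photos.eraseIdx pick) (results ++ [photos[pick]]) := by
        simp only [loopA, if_pos (by omega : 0 < photos.length), hpickeq,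
          PySem.List.pyGetD_natCast, List.getD_eq_getElem _ _ hpickphotos]
      have hwin : ((photos.take 100).map wmap)[pick] = (photos[pick], bKey lines photos[pick]) := by
        simp only [List.getElem_map, List.getElem_take, hwmap]
      have hB1 : loopB lines (fuel + 1) (bKey lines element) ((photos.take 100).map wmap) (photos.drop 100) results =
          (match photos.drop 100 with
           | [] => loopB lines fuel (bKey lines photos[pick]) (((photos.take 100).map wmap).eraseIdx pick) [] (results ++ [photos[pick]])
           | t :: ts => loopB lines fuel (bKey lines photos[pick])
               ((((photos.take 100).map wmap).eraseIdx pick) ++ [(t, bKey lines t)]) ts (results ++ [photos[pick]])) := by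
        simp only [loopB, if_pos hlen, ← hscores, ← hpickdef,
          PySem.List.pop?_natCast ((photos.take 100).map wmap) pick hpickwin, hwin]
      have herase : ((photos.take 100).map wmap).eraseIdx pick = ((photos.take 100).eraseIdx pick).map wmap := by
        rw [List.eraseIdx_map]
      have heraselen : ((photos.take 100).eraseIdx pick).length = 99 := by
        rw [List.length_eraseIdx, if_pos hpicktake, List.length_take]; omega
      have hsplit : photos.eraseIdx pick = (photos.take 100).eraseIdx pick ++ photos.drop 100 := by
        conv_lhs => rw [← List.take_append_drop 100 photos]
        exact List.eraseIdx_append_of_lt_length hpicktake _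
      have hlenerase : (photos.eraseIdx pick).length = fuel := by
        rw [List.length_eraseIdx, if_pos hpickphotos]; omega
      rw [hA, hB1]
      cases hdrop : photos.drop 100 with
      | nil =>
        have hp100 : photos.length = 100 := by
          have hz : (photos.drop 100).length = 0 := by rw [hdrop]; rfl
          rw [List.length_drop] at hz; omega
        have htake : (photos.eraseIdx pick).take 100 = (photos.take 100).eraseIdx pick := by
          rw [hsplit, hdrop, List.append_nil]
          exact List.take_of_length_le (by omega)
        have hdrop' : (photos.eraseIdx pick).drop 100 = [] := by
          rw [List.eq_nil_iff_length_eq_zero, List.length_drop, hlenerase]; omega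
        rw [ih photos[pick] (photos.eraseIdx pick) (results ++ [photos[pick]]) hlenerase,
          htake, hdrop', herase]
      | cons t ts =>
        have htake : (photos.eraseIdx pick).take 100 = (photos.take 100).eraseIdx pick ++ [t] := by
          have h1 := take_append_cons ((photos.take 100).eraseIdx pick) t ts
          rw [heraselen] at h1
          rw [hsplit, hdrop]
          exact h1
        have hdrop' : (photos.eraseIdx pick).drop 100 = ts := by
          have h1 := drop_append_cons ((photos.take 100).eraseIdx pick) t ts
          rw [heraselen] at h1
          rw [hsplit, hdrop]
          exact h1
        rw [ih photos[pick] (photos.eraseIdx pick) (results ++ [photos[pick]]) hlenerase,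
          htake, hdrop', herase, List.map_append]
        rfl
    · -- fewer than 100 remain: A appends them in order, B's window branch returns them in order
      have hwin : ((photos.take 100).map wmap).length = photos.length := by
        rw [List.length_map, List.length_take]; omega
      rw [← h, loopA_small lines photos element results (by omega)]
      have : loopB lines photos.length (bKey lines element) ((photos.take 100).map wmap) (photos.drop 100) results
          = results ++ ((photos.take 100).map wmap).map Prod.fst := by
        cases hl : photos.length with
        | zero => rfl
        | succ m =>
          have hne100 : ¬ ((photos.take 100).map wmap).length = 100 := by rw [hwin]; omega
          simp only [loopB, if_neg hne100]
      rw [this, List.take_of_length_le (by omega), List.map_map]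
      rw [((List.map_congr_left (fun a _ => rfl)).trans (List.map_id photos) :
        photos.map (Prod.fst ∘ wmap) = photos)]

-- ===== VERDICT (by name: the statement is the Claim_ definition above) =====
theorem construct_results_spec : Claim_equal_construct_results := by
  unfold Claim_equal_construct_results
  intro photos lines _hdom hpre
  unfold Spec_construct_results
  obtain ⟨hne, -⟩ := hpre
  rcases List.eq_nil_or_concat photos with rfl | ⟨xs, x, rfl⟩
  · exact absurd rfl hne
  rw [List.concat_eq_append]
  unfold construct_results construct_results_alt
  rw [PySem.List.pop?_last]
  by_cases hle : (xs ++ [x]).length ≤ 100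
  · rw [if_pos hle]
    have hxs : xs.length < 100 := by simp [List.length_append] at hle; omega
    show loopA lines xs.length x xs [x] = _
    rw [loopA_small lines xs x [x] hxs]
    rw [PySem.List.pyGet?_neg_one_append_singleton, PySem.List.slice_to_neg_one,
      List.dropLast_concat]
    simp
  · rw [if_neg hle]
    have hxslen : 100 ≤ xs.length := by simp [List.length_append] at hle; omega
    show loopA lines xs.length x xs [x] = _
    rw [PySem.List.pyGet?_neg_one_append_singleton]
    simp only [Option.getD_some, List.dropLast_concat]
    have htake : (xs ++ [x]).take 100 = xs.take 100 := by
      rw [List.take_append, show 100 - xs.length = 0 by omega]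
      simp
    have hfuel : ((xs.take 100).map (fun p => (p, bKey lines p))).length + (xs.drop 100).length = xs.length := by
      rw [List.length_map, List.length_take, List.length_drop]; omega
    rw [htake, hfuel]
    exact loop_sim lines xs.length x xs [x] rfl
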